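-- pv_equiv track=rewrite | github.com/hg-kaua/Learning_Python | codewars/6ky/dobra_matriz.py | fold_array
-- ===== SOURCE A (Python) =====
-- def fold_array(array, runs):
--     i = 0
--     new_arr = []
--     while i < runs:
--         if len(array) > 1:
--             new_arr = []
--             while len(array) > 1:
--                 new_arr.append(array[0]+array[-1])
--                 array = array[1:-1]
--
--                 if len(array) == 1:
--                     new_arr.append(array[0])
--         else:
--             return array
--         array = new_arr
--         i += 1
--
--     return new_arr
-- ===== SOURCE B (Python) =====
-- def fold_array(array, runs):
--     new_arr = []
--     for _ in range(runs):
--         if len(array) <= 1: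
--             return array
--         n = len(array)
--         new_arr = [array[i] + array[n - 1 - i] for i in range(n // 2)]
--         if n % 2:
--             new_arr.append(array[n // 2])
--         array = new_arr
--     return new_arr
-- ===== Notes on version B (the rewrite author's own statement) =====
-- stated objective: faster
-- what changed: each run is computed in one pass by index pairing (array[i]+array[n-1-i] for i < n//2, plus the middle element when n is odd) instead of repeatedly slicing off both ends, which copies the list on every step
import Mathlib
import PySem

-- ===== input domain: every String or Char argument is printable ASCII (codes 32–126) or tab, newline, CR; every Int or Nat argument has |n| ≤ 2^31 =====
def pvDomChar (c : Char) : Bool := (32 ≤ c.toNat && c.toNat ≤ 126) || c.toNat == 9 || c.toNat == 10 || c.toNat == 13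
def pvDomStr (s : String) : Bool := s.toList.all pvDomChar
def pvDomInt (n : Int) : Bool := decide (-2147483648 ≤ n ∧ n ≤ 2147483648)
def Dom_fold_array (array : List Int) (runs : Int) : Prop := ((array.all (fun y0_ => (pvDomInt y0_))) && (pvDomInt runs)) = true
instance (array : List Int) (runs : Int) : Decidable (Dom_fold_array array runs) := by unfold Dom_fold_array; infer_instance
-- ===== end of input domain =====

-- B replaces A's repeated end-slicing (a list copy per step) with one index-pairing pass per run: faster.

-- ===== PORT A =====
-- inner while loop of A: while len(array) > 1: append array[0]+array[-1]; array = array[1:-1]; if len == 1: append array[0]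
def foldInnerA (array new_arr : List Int) : List Int :=
  if array.length > 1 then
    let v := (PySem.List.pyGet? array 0).getD 0 + (PySem.List.pyGet? array (-1)).getD 0
    let array' := PySem.List.slice array (some 1) (some (-1))
    let new' := new_arr ++ [v]
    let new'' := if array'.length = 1 then new' ++ [(PySem.List.pyGet? array' 0).getD 0] else new'
    foldInnerA array' new''
  else new_arr
termination_by array.length
decreasing_by
  simp [PySem.List.slice, PySem.List.clampIdx]
  omega

-- outer while loop of A: while i < runs
def foldOuterA (array new_arr : List Int) (i runs : Int) : List Int :=
  if i < runs then
    if array.length > 1 then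
      let new' := foldInnerA array []
      foldOuterA new' new' (i + 1) runs
    else array
  else new_arr
termination_by (runs - i).toNat
decreasing_by omega

def fold_array (array : List Int) (runs : Int) : List Int :=
  foldOuterA array [] 0 runs

-- ===== PORT B =====
-- one fold pass: [array[i] + array[n-1-i] for i in range(n//2)] (+ middle element if n odd)
def foldOnceB (array : List Int) : List Int :=
  let n : Int := array.length
  let pairs := (PySem.List.pyRange 0 (PySem.Int.floordiv n 2) 1).map
    (fun i => (PySem.List.pyGet? array i).getD 0 + (PySem.List.pyGet? array (n - 1 - i)).getD 0)
  if PySem.Int.mod n 2 ≠ 0 then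
    pairs ++ [(PySem.List.pyGet? array (PySem.Int.floordiv n 2)).getD 0]
  else pairs

-- for _ in range(runs): (runs.toNat iterations)
def foldLoopB (array new_arr : List Int) : Nat → List Int
  | 0 => new_arr
  | k + 1 =>
    if array.length ≤ 1 then array
    else
      let new' := foldOnceB array
      foldLoopB new' new' k

def fold_array_alt (array : List Int) (runs : Int) : List Int :=
  foldLoopB array [] runs.toNat

-- ===== PRECONDITION & SPEC =====
def Spec_fold_array (array : List Int) (runs : Int) (out : List Int) : Prop := out = fold_array_alt array runs
instance (array : List Int) (runs : Int) (out : List Int) : Decidable (Spec_fold_array array runs out) := by unfold Spec_fold_array; infer_instance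

-- ===== CLAIM (what is proved, stated in full; the proofs are below) =====
def Claim_equal_fold_array : Prop := ∀ (array : List Int) (runs : Int), Dom_fold_array array runs → Spec_fold_array array runs (fold_array array runs)

-- ===== LEMMAS AND PROOFS =====

lemma foldOnceB_nil : foldOnceB [] = [] := by
  simp [foldOnceB, PySem.List.pyRange_one_eq_nil]

lemma foldOnceB_single (x : Int) : foldOnceB [x] = [x] := by
  simp [foldOnceB, PySem.Int.floordiv, PySem.Int.mod, PySem.List.pyRange_one_eq_nil]

lemma slice_one_neg_one (a b : Int) (mid : List Int) :
    PySem.List.slice (a :: mid ++ [b]) (some 1) (some (-1)) = mid := by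
  simp [PySem.List.slice, PySem.List.clampIdx]
  rw [if_neg (by omega : ¬((mid.length:Int) + 1 < 0))]
  simp

lemma pyGetL_last (a b : Int) (mid : List Int) :
    PySem.List.pyGet? (a :: mid ++ [b]) (-1) = some b := by
  rw [PySem.List.pyGet?_neg_one, List.getLast?_concat]

lemma pyGetL_zero (a b : Int) (mid : List Int) :
    PySem.List.pyGet? (a :: mid ++ [b]) 0 = some a := by
  rw [PySem.List.pyGet?_zero]
  simp

-- B's one-pass fold satisfies the peel-both-ends recurrence
lemma foldOnceB_cons_concat (a b : Int) (mid : List Int) :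
    foldOnceB (a :: mid ++ [b]) = (a + b) :: foldOnceB mid := by
  have hfd : PySem.Int.floordiv ((mid.length:Int)+2) 2 = ((mid.length/2 : Nat) : Int) + 1 := by
    rw [PySem.Int.floordiv_eq_ediv_of_pos (by norm_num)]; omega
  have hmod : PySem.Int.mod ((mid.length:Int)+2) 2 = ((mid.length % 2 : Nat) : Int) := by
    rw [PySem.Int.mod_eq_emod_of_pos (by norm_num)]; omega
  have hfd2 : PySem.Int.floordiv (mid.length:Int) 2 = ((mid.length/2:Nat):Int) := by
    rw [PySem.Int.floordiv_eq_ediv_of_pos (by norm_num)]; omega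
  have hmod2 : PySem.Int.mod (mid.length:Int) 2 = ((mid.length%2:Nat):Int) := by
    rw [PySem.Int.mod_eq_emod_of_pos (by norm_num)]; omega
  have hlen : ((a :: mid ++ [b]).length : Int) = (mid.length:Int) + 2 := by simp; omega
  have e1 : ((((mid.length / 2:Nat):Int) + 1 - 0)).toNat = mid.length / 2 + 1 := by omega
  have e2 : ((((mid.length / 2:Nat):Int) - 0)).toNat = mid.length / 2 := by omega
  have hhead : (PySem.List.pyGet? (a :: mid ++ [b]) (0:Int)).getD 0 +
      (PySem.List.pyGet? (a :: mid ++ [b]) ((mid.length:Int) + 2 - 1 - 0)).getD 0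
      = a + b := by
    have hi : ((mid.length:Int) + 2 - 1 - 0) = ((mid.length + 1 : Nat) : Int) := by
      push_cast; ring
    have hb : (a :: mid ++ [b])[mid.length + 1]? = some b := by
      simp
    rw [hi, pyGetL_zero, PySem.List.pyGet?_natCast, hb]
    rfl
  have htail : ∀ k : Nat, k < mid.length / 2 →
      (PySem.List.pyGet? (a :: mid ++ [b]) ((k+1:Nat):Int)).getD 0 +
      (PySem.List.pyGet? (a :: mid ++ [b]) ((mid.length:Int) + 2 - 1 - ((k+1:Nat):Int))).getD 0 =
      (PySem.List.pyGet? mid ((k:Nat):Int)).getD 0 +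
      (PySem.List.pyGet? mid ((mid.length:Int) - 1 - ((k:Nat):Int))).getD 0 := by
    intro k hk
    have hkm : k < mid.length := by omega
    have i2 : ((mid.length:Int) + 2 - 1 - ((k+1:Nat):Int)) = ((mid.length - k : Nat) : Int) := by
      omega
    have i4 : ((mid.length:Int) - 1 - ((k:Nat):Int)) = ((mid.length - 1 - k : Nat) : Int) := by
      omega
    rw [i2, i4, PySem.List.pyGet?_natCast, PySem.List.pyGet?_natCast,
      PySem.List.pyGet?_natCast, PySem.List.pyGet?_natCast]
    have g1 : (a :: mid ++ [b])[(k+1:Nat)]? = mid[k]? := by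
      rw [List.getElem?_append_left (by simp only [List.length_cons]; omega : k+1 < (a :: mid).length)]
      exact List.getElem?_cons_succ
    have g2 : (a :: mid ++ [b])[mid.length - k]? = mid[mid.length - 1 - k]? := by
      rw [List.getElem?_append_left (by simp only [List.length_cons]; omega : mid.length - k < (a :: mid).length)]
      have m1 : mid.length - k = (mid.length - 1 - k) + 1 := by omega
      rw [m1]
      exact List.getElem?_cons_succ
    rw [g1, g2]
  have hmid : 1 ≤ mid.length →
      PySem.List.pyGet? (a :: mid ++ [b]) (((mid.length/2 : Nat):Int) + 1) =
      PySem.List.pyGet? mid ((mid.length/2 : Nat):Int) := by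
    intro h1
    have hi : (((mid.length/2 : Nat):Int) + 1) = ((mid.length/2 + 1 : Nat) : Int) := by
      push_cast; ring
    rw [hi, PySem.List.pyGet?_natCast, PySem.List.pyGet?_natCast]
    rw [List.getElem?_append_left (by simp only [List.length_cons]; omega : mid.length/2 + 1 < (a :: mid).length)]
    rw [List.getElem?_cons_succ]
  simp only [foldOnceB, hlen, hfd, hmod, hfd2, hmod2, PySem.List.pyRange_one, e1, e2,
    List.map_map, Function.comp_def, zero_add]
  rw [List.range_succ_eq_map, List.map_cons, List.map_map, Function.comp_def]
  simp only [Nat.succ_eq_add_one, Nat.cast_zero]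
  by_cases hp : mid.length % 2 = 0
  · simp only [hp, Nat.cast_zero, ne_eq, not_true_eq_false, if_false]
    rw [hhead]
    congr 1
    apply List.map_congr_left
    intro k hk
    rw [List.mem_range] at hk
    exact htail k hk
  · have h1 : 1 ≤ mid.length := by omega
    simp only [ne_eq, Nat.cast_eq_zero, hp, not_false_eq_true, if_true]
    rw [List.cons_append, hhead, hmid h1]
    congr 2
    apply List.map_congr_left
    intro k hk
    rw [List.mem_range] at hk
    exact htail k hk

-- decomposition of a list of length ≥ 2
lemma exists_decomp (xs : List Int) (h : 1 < xs.length) :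
    ∃ a mid b, xs = a :: mid ++ [b] := by
  match xs with
  | [] => simp at h
  | [x] => simp at h
  | x :: y :: rest =>
    rcases List.eq_nil_or_concat (y :: rest) with h' | ⟨mid, b, h'⟩
    · simp at h'
    · exact ⟨x, mid, b, by simp [h']⟩

-- A's inner loop computes B's one-pass fold (fuel-indexed strong induction)
lemma foldInnerA_eq_aux : ∀ (n : Nat) (array : List Int), array.length ≤ n →
    ∀ acc : List Int, 1 < array.length → foldInnerA array acc = acc ++ foldOnceB array := by
  intro n
  induction n with
  | zero => intro array hle acc h2; omega
  | succ n ih =>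
    intro array hle acc h2
    obtain ⟨a, mid, b, rfl⟩ := exists_decomp array h2
    have hc : (a :: mid ++ [b]).length > 1 := by simp
    rw [foldInnerA, if_pos hc]
    simp only [slice_one_neg_one, pyGetL_zero, pyGetL_last, Option.getD_some]
    rw [foldOnceB_cons_concat]
    have hmle : mid.length ≤ n := by simp at hle; omega
    by_cases h1 : mid.length = 1
    · obtain ⟨x, rfl⟩ := List.length_eq_one_iff.mp h1
      rw [if_pos (show [x].length = 1 from rfl)]
      rw [foldInnerA, if_neg (by simp)]
      simp [foldOnceB_single]
    · rw [if_neg h1]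
      by_cases h2' : 1 < mid.length
      · rw [ih mid hmle (acc ++ [a+b]) h2']
        simp
      · have h0 : mid.length = 0 := by omega
        have hnil : mid = [] := by
          cases mid with
          | nil => rfl
          | cons z zs => simp at h0
        subst hnil
        rw [foldInnerA, if_neg (by simp)]
        simp [foldOnceB_nil]

lemma foldInnerA_spec (array : List Int) (h : 1 < array.length) :
    foldInnerA array [] = foldOnceB array := by
  rw [foldInnerA_eq_aux array.length array le_rfl [] h]
  simp

-- outer loops agree
lemma foldOuterA_eq : ∀ (k : Nat) (array new_arr : List Int) (i runs : Int),
    (runs - i).toNat = k → foldOuterA array new_arr i runs = foldLoopB array new_arr k := by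
  intro k
  induction k with
  | zero =>
    intro array new_arr i runs hk
    rw [foldOuterA, if_neg (by omega)]
    rfl
  | succ k ih =>
    intro array new_arr i runs hk
    have hir : i < runs := by omega
    rw [foldOuterA, if_pos hir]
    by_cases hlen : array.length > 1
    · rw [if_pos hlen]
      simp only [foldInnerA_spec array hlen]
      rw [ih _ _ (i+1) runs (by omega)]
      rw [foldLoopB, if_neg (by omega)]
    · rw [if_neg hlen, foldLoopB, if_pos (by omega)]

-- ===== VERDICT (by name: the statement is the Claim_ definition above) =====
theorem fold_array_spec : Claim_equal_fold_array := by
  intro array runs _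
  unfold Spec_fold_array fold_array fold_array_alt
  rw [foldOuterA_eq runs.toNat array [] 0 runs (by omega)]
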